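-- pv_equiv track=rewrite | github.com/MyselfSuhyun/Suhyun_Algo | Programmers/LV2_오픈 채팅방.py | solution
-- ===== SOURCE A (Python) =====
-- def solution(record):
--     user = dict()
--     answer = []
--     for r in record:
--         # 상태에 따라 record 값을 split 한다.
--         state= r.split()
--         # 들어올 경우, user dictionary 에 그 uid : name 을 키쌍 매칭후, append 한다.
--         if state[0] == "Enter":
--             user[state[1]] = state[2]
--             answer.append([state[1],"님이 들어왔습니다."])
--         # 나갔을 경우, 그 uid 와 나갔음을 append한다.
--         elif state[0] == "Leave":
--             answer.append([state[1],"님이 나갔습니다."])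
--         # 변했을 경우, user 에 저장된 uid 의 name을 변경해준다.
--         elif state[0] == "Change":
--             user[state[1]] = state[2]
--     # 결과를 출력할 result
--     result = []
--     for i in answer:
--         # 이름과 문구를 append 한뒤 반환한다.
--         result.append(f'{user[i[0]]}{i[1]}')
--     return result
-- ===== SOURCE B (Python) =====
-- def solution(record):
--     # pass 1: compute only the final name of each uid
--     user = {}
--     for r in record:
--         t = r.split()
--         if t[0] in ("Enter", "Change"):
--             user[t[1]] = t[2]
--     # pass 2: re-scan the raw records and emit messages directly
--     result = []
--     for r in record:
--         t = r.split()
--         if t[0] == "Enter":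
--             result.append(f'{user[t[1]]}님이 들어왔습니다.')
--         elif t[0] == "Leave":
--             result.append(f'{user[t[1]]}님이 나갔습니다.')
--     return result
-- ===== Notes on version B (the rewrite author's own statement) =====
-- stated objective: simpler
-- what changed: Drops A's intermediate answer list of (uid, suffix) pairs: B scans the raw records twice, first building only the final-names dict, then re-splitting each record and emitting the messages directly.
import Mathlib
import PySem

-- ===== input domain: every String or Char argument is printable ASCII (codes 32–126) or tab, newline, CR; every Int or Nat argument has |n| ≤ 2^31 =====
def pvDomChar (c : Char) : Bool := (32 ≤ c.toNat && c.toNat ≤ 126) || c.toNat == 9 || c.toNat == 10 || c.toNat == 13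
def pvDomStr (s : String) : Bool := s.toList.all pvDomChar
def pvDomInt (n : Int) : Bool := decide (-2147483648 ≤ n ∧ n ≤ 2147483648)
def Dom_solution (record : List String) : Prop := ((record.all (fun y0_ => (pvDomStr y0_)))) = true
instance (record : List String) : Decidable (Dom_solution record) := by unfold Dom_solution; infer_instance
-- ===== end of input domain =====

-- B rewrites A by a different decomposition: no intermediate (uid, suffix) event list; B scans the
-- raw records twice (final-names dict first, then direct message emission). Equivalence on Pre_.

-- ===== PORT A =====
-- first loop of A: builds the dict `user` and the event list `answer`; none = exception
def solA1 : List String → PySem.Dict String String → List (String × String) →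
    Option (PySem.Dict String String × List (String × String))
  | [], u, ans => some (u, ans)
  | r :: rest, u, ans =>
    let st := PySem.Str.split₀ r
    match PySem.List.pyGet? st 0 with
    | none => none
    | some t0 =>
      if t0 = "Enter" then
        match PySem.List.pyGet? st 1, PySem.List.pyGet? st 2 with
        | some t1, some t2 =>
            solA1 rest (u.insert t1 t2) (ans ++ [(t1, "님이 들어왔습니다.")])
        | _, _ => none
      else if t0 = "Leave" then
        match PySem.List.pyGet? st 1 with
        | some t1 => solA1 rest u (ans ++ [(t1, "님이 나갔습니다.")])
        | none => none
      else if t0 = "Change" then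
        match PySem.List.pyGet? st 1, PySem.List.pyGet? st 2 with
        | some t1, some t2 => solA1 rest (u.insert t1 t2) ans
        | _, _ => none
      else solA1 rest u ans

-- second loop of A: result.append(f'{user[i[0]]}{i[1]}')
def solA2 : List (String × String) → PySem.Dict String String → List String → Option (List String)
  | [], _, res => some res
  | (uid, suf) :: rest, u, res =>
    match u.get? uid with
    | some name => solA2 rest u (res ++ [name ++ suf])
    | none => none

def solution (record : List String) : List String :=
  (match solA1 record PySem.Dict.empty [] with
   | some (u, ans) => solA2 ans u []
   | none => none).getD []

-- ===== PORT B =====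
-- B pass 1: only the final-names dict (Enter/Change set the name, Leave is ignored)
def solB1 : List String → PySem.Dict String String → Option (PySem.Dict String String)
  | [], u => some u
  | r :: rest, u =>
    let st := PySem.Str.split₀ r
    match PySem.List.pyGet? st 0 with
    | none => none
    | some t0 =>
      if t0 = "Enter" ∨ t0 = "Change" then
        match PySem.List.pyGet? st 1, PySem.List.pyGet? st 2 with
        | some t1, some t2 => solB1 rest (u.insert t1 t2)
        | _, _ => none
      else solB1 rest u

-- B pass 2: re-split each record and emit the message directly
def solB2 : List String → PySem.Dict String String → List String → Option (List String)
  | [], _, res => some res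
  | r :: rest, u, res =>
    let st := PySem.Str.split₀ r
    match PySem.List.pyGet? st 0 with
    | none => none
    | some t0 =>
      if t0 = "Enter" then
        match PySem.List.pyGet? st 1 with
        | some t1 =>
          match u.get? t1 with
          | some name => solB2 rest u (res ++ [name ++ "님이 들어왔습니다."])
          | none => none
        | none => none
      else if t0 = "Leave" then
        match PySem.List.pyGet? st 1 with
        | some t1 =>
          match u.get? t1 with
          | some name => solB2 rest u (res ++ [name ++ "님이 나갔습니다."])
          | none => none
        | none => none
      else solB2 rest u res

def solution_alt (record : List String) : List String :=
  (match solB1 record PySem.Dict.empty with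
   | some u => solB2 record u []
   | none => none).getD []

-- ===== PRECONDITION & SPEC =====
-- the "Enter"/"Change" uids of a record line (used only to state Pre_)
def pvEcUid (r : String) : Option String :=
  match PySem.Str.split₀ r with
  | t0 :: t1 :: _ :: _ => if t0 = "Enter" ∨ t0 = "Change" then some t1 else none
  | _ => none

-- token-arity condition of one line: state[0] exists, Enter/Change have ≥ 3 tokens, Leave ≥ 2
def pvLineOk (r : String) : Prop :=
  PySem.Str.split₀ r ≠ [] ∧
  ((PySem.Str.split₀ r).head? = some "Enter" ∨ (PySem.Str.split₀ r).head? = some "Change" →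
      3 ≤ (PySem.Str.split₀ r).length) ∧
  ((PySem.Str.split₀ r).head? = some "Leave" → 2 ≤ (PySem.Str.split₀ r).length)

-- Pre_ excludes exactly the inputs on which Python A raises: a line too short for its command
-- (IndexError) or a "Leave" of a uid never seen in an Enter/Change line (KeyError).
def Pre_solution (record : List String) : Prop :=
  (∀ r ∈ record, pvLineOk r) ∧
  (∀ r ∈ record, (PySem.Str.split₀ r).head? = some "Leave" →
      ∃ t1 ∈ record.filterMap pvEcUid, (PySem.Str.split₀ r)[1]? = some t1)
instance (record : List String) : Decidable (Pre_solution record) := by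
  unfold Pre_solution pvLineOk; infer_instance

def pvWitness_solution : List String :=
  ["Enter u1 Muzi", "Enter u2 Prodo", "Leave u1", "Enter u1 Prodo", "Change u2 Ryan"]

def Spec_solution (record : List String) (out : List String) : Prop := out = solution_alt record
instance (record : List String) (out : List String) : Decidable (Spec_solution record out) := by
  unfold Spec_solution; infer_instance

-- ===== CLAIM (what is proved, stated in full; the proofs are below) =====
def Claim_equal_solution : Prop :=
  ∀ (record : List String), Dom_solution record → Pre_solution record →
    Spec_solution record (solution record)

-- ===== LEMMAS AND PROOFS =====

lemma pvNE_LE : ("Leave" : String) ≠ "Enter" := by decide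
lemma pvNE_CE : ("Change" : String) ≠ "Enter" := by decide
lemma pvNE_CL : ("Change" : String) ≠ "Leave" := by decide
lemma pvNE_EC : ("Enter" : String) ≠ "Change" := by decide
lemma pvNE_LC : ("Leave" : String) ≠ "Change" := by decide

-- the events A records, and the dict both passes build, as total functions of the input
def pvEv1 (r : String) : Option (String × String) :=
  match PySem.Str.split₀ r with
  | t0 :: t1 :: _ =>
      if t0 = "Enter" then some (t1, "님이 들어왔습니다.")
      else if t0 = "Leave" then some (t1, "님이 나갔습니다.")
      else none
  | _ => none

def pvEvents : List String → List (String × String)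
  | [] => []
  | r :: rest =>
    match pvEv1 r with
    | some e => e :: pvEvents rest
    | none => pvEvents rest

def pvDict : List String → PySem.Dict String String → PySem.Dict String String
  | [], u => u
  | r :: rest, u =>
    match PySem.Str.split₀ r with
    | t0 :: t1 :: t2 :: _ =>
        pvDict rest (if t0 = "Enter" ∨ t0 = "Change" then u.insert t1 t2 else u)
    | _ => pvDict rest u

lemma pvPG0 {α : Type} (a : α) (l : List α) : PySem.List.pyGet? (a::l) 0 = some a := by
  simp

lemma pvPG1 {α : Type} (a b : α) (l : List α) : PySem.List.pyGet? (a::b::l) 1 = some b := by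
  simp [PySem.List.pyGet?, PySem.List.pyIdx?]

lemma pvPG2 {α : Type} (a b c : α) (l : List α) : PySem.List.pyGet? (a::b::c::l) 2 = some c := by
  simp [PySem.List.pyGet?, PySem.List.pyIdx?, show (2:Int) ≤ ↑l.length + 1 + 1 by omega]

lemma solA1_ok (rs : List String) (h : ∀ r ∈ rs, pvLineOk r) :
    ∀ u ans, solA1 rs u ans = some (pvDict rs u, ans ++ pvEvents rs) := by
  induction rs with
  | nil => intro u ans; simp [solA1, pvDict, pvEvents]
  | cons r rest ih =>
    intro u ans
    have hr : pvLineOk r := h r (by simp)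
    have hrest : ∀ r ∈ rest, pvLineOk r := fun r hm => h r (by simp [hm])
    cases hst : PySem.Str.split₀ r with
    | nil => simp only [pvLineOk, hst] at hr; simp at hr
    | cons t0 ts =>
      simp only [pvLineOk, hst] at hr
      cases ts with
      | nil =>
        have h1 : t0 ≠ "Enter" := fun e => by simp [e] at hr
        have h2 : t0 ≠ "Change" := fun e => by simp [e] at hr
        have h3 : t0 ≠ "Leave" := fun e => by simp [e] at hr
        simp only [solA1, hst, pvPG0]
        simp [h1, h2, h3, ih hrest, pvDict, pvEvents, pvEv1, hst]
      | cons t1 ts2 =>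
        cases ts2 with
        | nil =>
          have h1 : t0 ≠ "Enter" := fun e => by simp [e] at hr
          have h2 : t0 ≠ "Change" := fun e => by simp [e] at hr
          by_cases hL : t0 = "Leave" <;>
          · simp only [solA1, hst, pvPG0, pvPG1]
            simp [h1, h2, hL, ih hrest, pvDict, pvEvents, pvEv1, hst,
              pvNE_LE]
        | cons t2 ts3 =>
          by_cases hE : t0 = "Enter"
          · simp only [solA1, hst, pvPG0, pvPG1, pvPG2]
            simp [hE, ih hrest, pvDict, pvEvents, pvEv1, hst, pvNE_EC]
          · by_cases hL : t0 = "Leave"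
            · simp only [solA1, hst, pvPG0, pvPG1, pvPG2]
              simp [ hL, ih hrest, pvDict, pvEvents, pvEv1, hst,
                pvNE_LE, pvNE_LC]
            · by_cases hC : t0 = "Change" <;>
              · simp only [solA1, hst, pvPG0, pvPG1, pvPG2]
                simp [hE, hL, hC, ih hrest, pvDict, pvEvents, pvEv1, hst, pvNE_CE, pvNE_CL]

lemma solB1_ok (rs : List String) (h : ∀ r ∈ rs, pvLineOk r) :
    ∀ u, solB1 rs u = some (pvDict rs u) := by
  induction rs with
  | nil => intro u; simp [solB1, pvDict]
  | cons r rest ih =>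
    intro u
    have hr : pvLineOk r := h r (by simp)
    have hrest : ∀ r ∈ rest, pvLineOk r := fun r hm => h r (by simp [hm])
    cases hst : PySem.Str.split₀ r with
    | nil => simp only [pvLineOk, hst] at hr; simp at hr
    | cons t0 ts =>
      simp only [pvLineOk, hst] at hr
      cases ts with
      | nil =>
        have h1 : t0 ≠ "Enter" := fun e => by simp [e] at hr
        have h2 : t0 ≠ "Change" := fun e => by simp [e] at hr
        simp only [solB1, hst, pvPG0]
        simp [h1, h2, ih hrest, pvDict, hst]
      | cons t1 ts2 =>
        cases ts2 with
        | nil =>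
          have h1 : t0 ≠ "Enter" := fun e => by simp [e] at hr
          have h2 : t0 ≠ "Change" := fun e => by simp [e] at hr
          simp only [solB1, hst, pvPG0, pvPG1]
          simp [h1, h2, ih hrest, pvDict, hst]
        | cons t2 ts3 =>
          by_cases hEC : t0 = "Enter" ∨ t0 = "Change" <;>
          · simp only [solB1, hst, pvPG0, pvPG1, pvPG2]
            simp [hEC, ih hrest, pvDict, hst]

-- A's second loop over the event list equals B's second scan of the raw records
lemma solA2_eq_solB2 (rs : List String) (h : ∀ r ∈ rs, pvLineOk r) :
    ∀ u res, solA2 (pvEvents rs) u res = solB2 rs u res := by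
  induction rs with
  | nil => intro u res; simp [solA2, solB2, pvEvents]
  | cons r rest ih =>
    intro u res
    have hr : pvLineOk r := h r (by simp)
    have hrest : ∀ r ∈ rest, pvLineOk r := fun r hm => h r (by simp [hm])
    cases hst : PySem.Str.split₀ r with
    | nil => simp only [pvLineOk, hst] at hr; simp at hr
    | cons t0 ts =>
      simp only [pvLineOk, hst] at hr
      cases ts with
      | nil =>
        have h1 : t0 ≠ "Enter" := fun e => by simp [e] at hr
        have h3 : t0 ≠ "Leave" := fun e => by simp [e] at hr
        simp only [solB2, hst, pvPG0, pvEvents, pvEv1]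
        simp [h1, h3, ih hrest]
      | cons t1 ts2 =>
        by_cases hE : t0 = "Enter"
        · simp only [solB2, hst, pvPG0, pvPG1, pvEvents, pvEv1]
          simp only [ hE, reduceIte]
          cases hget : u.get? t1 <;> simp [solA2, hget, ih hrest]
        · by_cases hL : t0 = "Leave"
          · simp only [solB2, hst, pvPG0, pvPG1, pvEvents, pvEv1]
            simp only [ hL, reduceIte]
            cases hget : u.get? t1 <;> simp [solA2, hget, ih hrest]
          · simp only [solB2, hst, pvPG0, pvPG1, pvEvents, pvEv1]
            simp only [ if_neg hE, if_neg hL]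
            exact ih hrest u res

-- ===== VERDICT (by name: the statement is the Claim_ definition above) =====
theorem solution_spec : Claim_equal_solution := by
  intro record _ hpre
  unfold Spec_solution solution solution_alt
  rw [solA1_ok record hpre.1, solB1_ok record hpre.1]
  simp [solA2_eq_solB2 record hpre.1]
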